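-- pv_equiv track=rewrite | github.com/rdempsey/python-for-sharing | practical-predictive-modeling-in-python/scoring code/bin/tlo_verification_and_matching.py | determine_review_type
-- ===== SOURCE A (Python) =====
-- def determine_review_type(full_name_check_value, verified, name_scores):
--     """
--     Determines the type of review needed for a record given N1 and N2 scores
--     Rule 2: If any name score is 280 or above, no review because it's verified
--     Rule 2: If 280 > name_score >= 260 => Flag for visual review
--     Rule 3: Everything else is flagged for alias review
--     :param n1_score:
--     :param n2_score:
--     :return: review_type
--     """
--     if full_name_check_value == 1 or verified == 1:
--         return ""
--
--     for v in name_scores: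
--         if v >= 280:
--             return ""
--
--     for v in name_scores:
--         if 279 >= v >= 260:
--             return "VISUAL"
--
--     return ""
-- ===== SOURCE B (Python) =====
-- def determine_review_type(full_name_check_value, verified, name_scores):
--     if full_name_check_value == 1 or verified == 1:
--         return ""
--     visual = False
--     for v in name_scores:
--         if v >= 280:
--             return ""
--         elif 260 <= v <= 279:
--             visual = True
--     return "VISUAL" if visual else ""
-- ===== Notes on version B (the rewrite author's own statement) =====
-- stated objective: simpler
-- what changed: Replaces A's two separate scans of name_scores with a single pass that returns "" immediately on a score >= 280 and otherwise records a visual flag for scores in 260..279.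
import Mathlib
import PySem

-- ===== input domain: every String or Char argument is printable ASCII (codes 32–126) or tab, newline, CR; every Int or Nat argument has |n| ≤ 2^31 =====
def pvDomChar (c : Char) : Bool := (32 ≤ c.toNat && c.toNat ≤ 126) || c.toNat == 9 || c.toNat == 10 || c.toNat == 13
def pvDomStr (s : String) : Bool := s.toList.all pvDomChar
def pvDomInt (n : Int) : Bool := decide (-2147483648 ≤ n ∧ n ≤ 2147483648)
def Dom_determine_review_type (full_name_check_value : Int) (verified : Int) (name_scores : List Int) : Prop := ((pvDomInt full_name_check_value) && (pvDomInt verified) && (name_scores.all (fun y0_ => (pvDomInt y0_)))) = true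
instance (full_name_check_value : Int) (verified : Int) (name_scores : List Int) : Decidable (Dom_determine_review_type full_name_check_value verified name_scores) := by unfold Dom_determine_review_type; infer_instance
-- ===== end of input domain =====

-- B replaces A's two separate scans with one pass carrying a visual flag (objective: simpler).

-- ===== PORT A =====
-- first loop: 'for v in name_scores: if v >= 280: return ""'
def detrtScan280 : List Int → Option String
  | [] => none
  | v :: rest => if v ≥ 280 then some "" else detrtScan280 rest

-- second loop: 'for v in name_scores: if 279 >= v >= 260: return "VISUAL"'
def detrtScanVisual : List Int → Option String
  | [] => none
  | v :: rest => if 279 ≥ v ∧ v ≥ 260 then some "VISUAL" else detrtScanVisual rest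

def determine_review_type (full_name_check_value : Int) (verified : Int) (name_scores : List Int) : String :=
  if full_name_check_value = 1 ∨ verified = 1 then ""
  else
    match detrtScan280 name_scores with
    | some s => s
    | none =>
      match detrtScanVisual name_scores with
      | some s => s
      | none => ""

-- ===== PORT B =====
-- single loop with 'visual' flag; early return on v >= 280
def detrtOnePass : List Int → Bool → String
  | [], visual => if visual then "VISUAL" else ""
  | v :: rest, visual =>
    if v ≥ 280 then ""
    else if 260 ≤ v ∧ v ≤ 279 then detrtOnePass rest true
    else detrtOnePass rest visual

def determine_review_type_alt (full_name_check_value : Int) (verified : Int) (name_scores : List Int) : String :=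
  if full_name_check_value = 1 ∨ verified = 1 then ""
  else detrtOnePass name_scores false

-- ===== PRECONDITION & SPEC =====
def Spec_determine_review_type (full_name_check_value : Int) (verified : Int) (name_scores : List Int) (out : String) : Prop := out = determine_review_type_alt full_name_check_value verified name_scores
instance (full_name_check_value : Int) (verified : Int) (name_scores : List Int) (out : String) : Decidable (Spec_determine_review_type full_name_check_value verified name_scores out) := by unfold Spec_determine_review_type; infer_instance

-- ===== CLAIM (what is proved, stated in full; the proofs are below) =====
def Claim_equal_determine_review_type : Prop := ∀ (full_name_check_value : Int) (verified : Int) (name_scores : List Int), Dom_determine_review_type full_name_check_value verified name_scores → Spec_determine_review_type full_name_check_value verified name_scores (determine_review_type full_name_check_value verified name_scores)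

-- ===== LEMMAS AND PROOFS =====

lemma detrtScanVisual_eq (l : List Int) (s : String) (h : detrtScanVisual l = some s) : s = "VISUAL" := by
  induction l with
  | nil => simp [detrtScanVisual] at h
  | cons v rest ih =>
    simp only [detrtScanVisual] at h
    split at h
    · exact (Option.some_inj.mp h).symm
    · exact ih h

lemma detrtOnePass_eq (l : List Int) (visual : Bool) :
    detrtOnePass l visual =
      match detrtScan280 l with
      | some s => s
      | none =>
        match detrtScanVisual l with
        | some s => s
        | none => if visual then "VISUAL" else "" := by
  induction l generalizing visual with
  | nil => simp [detrtOnePass, detrtScan280, detrtScanVisual]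
  | cons v rest ih =>
    simp only [detrtOnePass, detrtScan280, detrtScanVisual]
    by_cases h280 : v ≥ 280
    · simp [h280]
    · by_cases hvis : 260 ≤ v ∧ v ≤ 279
      · have hvis' : 279 ≥ v ∧ v ≥ 260 := ⟨hvis.2, hvis.1⟩
        simp only [h280, hvis]
        rw [ih true]
        cases hs : detrtScan280 rest with
        | some s => simp
        | none =>
          cases hs2 : detrtScanVisual rest with
          | some s => simp [detrtScanVisual_eq rest s hs2]
          | none => simp
      · have hvis' : ¬ (279 ≥ v ∧ v ≥ 260) := by
          intro ⟨h1, h2⟩; exact hvis ⟨h2, h1⟩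
        simp only [if_neg h280, if_neg hvis, if_neg hvis']
        exact ih visual

-- ===== VERDICT (by name: the statement is the Claim_ definition above) =====
theorem determine_review_type_spec : Claim_equal_determine_review_type := by
  intro f v ns _
  unfold Spec_determine_review_type determine_review_type determine_review_type_alt
  by_cases hg : f = 1 ∨ v = 1
  · simp [hg]
  · simp only [if_neg hg]
    rw [detrtOnePass_eq]
    simp
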